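-- pv_equiv track=rewrite | github.com/rh569/advent-of-code-2022 | days/day_14.py | make_rocks_by_x_map
-- ===== SOURCE A (Python) =====
-- def get_rocks(rock_path: list[list[int]]) -> list[list[int]]:
--     rocks = []
--
--     for i, p1 in enumerate(rock_path):
--         if i == len(rock_path) - 1: continue
--         p2 = rock_path[i + 1]
--
--         # vertical lines
--         if p1[0] == p2[0] and p1[1] < p2[1]:
--             for y in range(p1[1], p2[1] + 1):
--                 rocks.append([p1[0], y])
--         if p1[0] == p2[0] and p1[1] > p2[1]:
--             for y in range(p2[1], p1[1] + 1):
--                 rocks.append([p1[0], y])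
--
--         # horizontal lines
--         if p1[1] == p2[1] and p1[0] < p2[0]:
--             for x in range(p1[0], p2[0] + 1):
--                 rocks.append([x, p1[1]])
--         if p1[1] == p2[1] and p1[0] > p2[0]:
--             for x in range(p2[0], p1[0] + 1):
--                 rocks.append([x, p1[1]])
--
--     return rocks
--
-- def make_rocks_by_x_map(rock_paths: list[list[list[int]]]):
--     rocks_by_x: dict[int, list[int]] = {}
--
--     for p in rock_paths:
--         for r in get_rocks(p):
--             if rocks_by_x.get(r[0]) is None:
--                 rocks_by_x[r[0]] = [r[1]]
--             elif not r[1] in rocks_by_x[r[0]]: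
--                 rocks_by_x[r[0]].append(r[1])
--
--     return rocks_by_x
-- ===== SOURCE B (Python) =====
-- def make_rocks_by_x_map(rock_paths):
--     # Pass 1: expand each straight segment with one direction-vector formula,
--     # walking from its lexicographically smaller endpoint, into one flat cell list.
--     cells = []
--     for path in rock_paths:
--         for p1, p2 in zip(path, path[1:]):
--             dx, dy = p2[0] - p1[0], p2[1] - p1[1]
--             if (dx == 0) == (dy == 0):
--                 continue  # degenerate point or diagonal segment: nothing emitted
--             sx, sy = int(dx != 0), int(dy != 0)
--             x0, y0 = min(p1[0], p2[0]), min(p1[1], p2[1])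
--             cells.extend((x0 + i * sx, y0 + i * sy) for i in range(abs(dx) + abs(dy) + 1))
--     # Pass 2: group by x — keys in first-occurrence order, each value the
--     # first-occurrence dedup of that x's column of the flat cell list.
--     order = list(dict.fromkeys(x for x, _ in cells))
--     return {x: list(dict.fromkeys(y for cx, y in cells if cx == x)) for x in order}
-- ===== Notes on version B (the rewrite author's own statement) =====
-- stated objective: alternative
-- what changed: A walks each segment via four orientation branches, appends rock cells one at a time into a per-x dict and deduplicates on the fly with a linear membership scan per cell; B expands every segment with a single direction-vector formula from its smaller endpoint into one flat cell list, then groups that list by x in a second pass (first-occurrence key order, dict.fromkeys dedup per column), never maintaining an incremental dict during the scan.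
import Mathlib
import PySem

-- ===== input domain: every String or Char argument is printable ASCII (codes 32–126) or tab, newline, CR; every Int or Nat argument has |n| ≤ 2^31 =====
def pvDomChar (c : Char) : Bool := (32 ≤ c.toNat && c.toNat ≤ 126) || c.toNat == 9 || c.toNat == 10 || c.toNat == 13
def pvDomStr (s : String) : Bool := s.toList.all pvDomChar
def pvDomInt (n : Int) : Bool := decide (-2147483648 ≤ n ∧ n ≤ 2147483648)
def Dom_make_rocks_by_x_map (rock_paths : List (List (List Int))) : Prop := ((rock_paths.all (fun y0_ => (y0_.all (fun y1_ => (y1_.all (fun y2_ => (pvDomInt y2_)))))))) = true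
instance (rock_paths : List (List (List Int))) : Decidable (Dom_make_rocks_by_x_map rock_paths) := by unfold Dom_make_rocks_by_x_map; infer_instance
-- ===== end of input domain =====

-- B replaces A's four-branch per-cell dict accumulation by a direction-vector bulk
-- expansion into one flat cell list followed by a group-by-x pass (objective: alternative).

-- ===== PORT A =====
-- the body of get_rocks' loop, named so the proofs can speak about one iteration
def getRocksBody (rock_path : List (List Int)) (rocks : List (List Int)) (ip : Int × List Int) : List (List Int) :=
  if ip.1 = (rock_path.length : Int) - 1 then rocks
  else
    -- point lookups are in range under Pre_ (.getD only totalises them)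
    let p2 := (PySem.List.pyGet? rock_path (ip.1 + 1)).getD []
    let x1 := (PySem.List.pyGet? ip.2 0).getD 0
    let y1 := (PySem.List.pyGet? ip.2 1).getD 0
    let x2 := (PySem.List.pyGet? p2 0).getD 0
    let y2 := (PySem.List.pyGet? p2 1).getD 0
    let rocks := if x1 = x2 ∧ y1 < y2 then rocks ++ (PySem.List.pyRange y1 (y2 + 1) 1).map (fun y => [x1, y]) else rocks
    let rocks := if x1 = x2 ∧ y2 < y1 then rocks ++ (PySem.List.pyRange y2 (y1 + 1) 1).map (fun y => [x1, y]) else rocks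
    let rocks := if y1 = y2 ∧ x1 < x2 then rocks ++ (PySem.List.pyRange x1 (x2 + 1) 1).map (fun x => [x, y1]) else rocks
    let rocks := if y1 = y2 ∧ x2 < x1 then rocks ++ (PySem.List.pyRange x2 (x1 + 1) 1).map (fun x => [x, y1]) else rocks
    rocks

def getRocks (rock_path : List (List Int)) : List (List Int) :=
  (PySem.List.enumerate rock_path).foldl (getRocksBody rock_path) []

-- the body of make_rocks_by_x_map's inner loop (one rock r)
def aStep (d : PySem.Dict Int (List Int)) (r : List Int) : PySem.Dict Int (List Int) :=
  let x := (PySem.List.pyGet? r 0).getD 0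
  let y := (PySem.List.pyGet? r 1).getD 0
  match PySem.Dict.get? d x with
  | none => d.insert x [y]
  | some ys => if y ∈ ys then d else d.insert x (ys ++ [y])

def make_rocks_by_x_map (rock_paths : List (List (List Int))) : List (Int × List Int) :=
  (rock_paths.foldl (fun d p => (getRocks p).foldl aStep d)
    (PySem.Dict.empty : PySem.Dict Int (List Int))).items

-- ===== PORT B =====
-- one segment of B's first pass: the direction-vector expansion from the smaller endpoint
def bCell (p1 p2 : List Int) : List (Int × Int) :=
  let x1 := (PySem.List.pyGet? p1 0).getD 0
  let y1 := (PySem.List.pyGet? p1 1).getD 0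
  let x2 := (PySem.List.pyGet? p2 0).getD 0
  let y2 := (PySem.List.pyGet? p2 1).getD 0
  let dx := x2 - x1
  let dy := y2 - y1
  if (dx = 0) ↔ (dy = 0) then []
  else
    let sx : Int := if dx ≠ 0 then 1 else 0
    let sy : Int := if dy ≠ 0 then 1 else 0
    let x0 := min x1 x2
    let y0 := min y1 y2
    (PySem.List.pyRange 0 (|dx| + |dy| + 1) 1).map (fun i => (x0 + i * sx, y0 + i * sy))

def make_rocks_by_x_map_alt (rock_paths : List (List (List Int))) : List (Int × List Int) :=
  let cells := rock_paths.foldl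
    (fun acc path => (path.zip path.tail).foldl (fun acc q => acc ++ bCell q.1 q.2) acc) []
  let order := PySem.List.dedup (cells.map (·.1))
  order.map (fun x => (x, PySem.List.dedup ((cells.filter (fun c => c.1 == x)).map (·.2))))

-- ===== PRECONDITION & SPEC =====
-- Pre_ excludes exactly the inputs where A raises IndexError: a path with at least two
-- points containing a point with fewer than two coordinates (B raises there too).
def Pre_make_rocks_by_x_map (rock_paths : List (List (List Int))) : Prop :=
  ∀ path ∈ rock_paths, 2 ≤ path.length → ∀ p ∈ path, 2 ≤ p.length
instance (rock_paths : List (List (List Int))) : Decidable (Pre_make_rocks_by_x_map rock_paths) := by unfold Pre_make_rocks_by_x_map; infer_instance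

def pvWitness_make_rocks_by_x_map : List (List (List Int)) :=
  [[[498, 4], [498, 6], [496, 6]], [[503, 4], [502, 4], [502, 9], [494, 9]]]

def Spec_make_rocks_by_x_map (rock_paths : List (List (List Int))) (out : List (Int × List Int)) : Prop := out = make_rocks_by_x_map_alt rock_paths
instance (rock_paths : List (List (List Int))) (out : List (Int × List Int)) : Decidable (Spec_make_rocks_by_x_map rock_paths out) := by unfold Spec_make_rocks_by_x_map; infer_instance

-- ===== CLAIM (what is proved, stated in full; the proofs are below) =====
def Claim_equal_make_rocks_by_x_map : Prop := ∀ (rock_paths : List (List (List Int))), Dom_make_rocks_by_x_map rock_paths → Pre_make_rocks_by_x_map rock_paths → Spec_make_rocks_by_x_map rock_paths (make_rocks_by_x_map rock_paths)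

-- ===== LEMMAS AND PROOFS =====

-- the (x, y) cells of one segment, in A's emission order
def pvSegRaw (x1 y1 x2 y2 : Int) : List (Int × Int) :=
  if x1 = x2 ∧ y1 < y2 then (PySem.List.pyRange y1 (y2 + 1) 1).map (fun y => (x1, y))
  else if x1 = x2 ∧ y2 < y1 then (PySem.List.pyRange y2 (y1 + 1) 1).map (fun y => (x1, y))
  else if y1 = y2 ∧ x1 < x2 then (PySem.List.pyRange x1 (x2 + 1) 1).map (fun x => (x, y1))
  else if y1 = y2 ∧ x2 < x1 then (PySem.List.pyRange x2 (x1 + 1) 1).map (fun x => (x, y1))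
  else []

def pvSeg (p1 p2 : List Int) : List (Int × Int) :=
  pvSegRaw ((PySem.List.pyGet? p1 0).getD 0) ((PySem.List.pyGet? p1 1).getD 0)
           ((PySem.List.pyGet? p2 0).getD 0) ((PySem.List.pyGet? p2 1).getD 0)

def pvStream (rock_paths : List (List (List Int))) : List (Int × Int) :=
  rock_paths.flatMap (fun path => (path.zip path.tail).flatMap (fun q => pvSeg q.1 q.2))

def pvRockStep (d : PySem.Dict Int (List Int)) (q : Int × Int) : PySem.Dict Int (List Int) :=
  match PySem.Dict.get? d q.1 with
  | none => d.insert q.1 [q.2]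
  | some ys => if q.2 ∈ ys then d else d.insert q.1 (ys ++ [q.2])

def pvRawPoint (d : PySem.Dict Int (List Int)) (q : Int × Int) : PySem.Dict Int (List Int) :=
  d.insert q.1 (d.getD q.1 [] ++ [q.2])

def pvMapDedup (d : PySem.Dict Int (List Int)) : PySem.Dict Int (List Int) :=
  PySem.Dict.mk (d.items.map (fun p => (p.1, PySem.List.dedup p.2)))

-- the y column of the cell stream at x, in stream order
def pvYs (s : List (Int × Int)) (x : Int) : List Int :=
  (s.filter (fun c => c.1 == x)).map Prod.snd

lemma pvGet?_mapDedup (d : PySem.Dict Int (List Int)) (k : Int) :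
    (pvMapDedup d).get? k = (d.get? k).map PySem.List.dedup := by
  simp [pvMapDedup, PySem.Dict.get?, List.find?_map, Function.comp_def, Option.map_map]

lemma pvContains_mapDedup (d : PySem.Dict Int (List Int)) (k : Int) :
    (pvMapDedup d).contains k = d.contains k := by
  simp [pvMapDedup, PySem.Dict.contains, List.any_map, Function.comp_def]

lemma pvKeys_mapDedup (d : PySem.Dict Int (List Int)) :
    (pvMapDedup d).keys = d.keys := by
  obtain ⟨l⟩ := d
  simp [pvMapDedup, PySem.Dict.keys_mk, List.map_map, Function.comp]

lemma pvInsert_mapDedup (d : PySem.Dict Int (List Int)) (k : Int) (v : List Int) :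
    pvMapDedup (d.insert k v) = (pvMapDedup d).insert k (PySem.List.dedup v) := by
  by_cases h : d.contains k = true
  · have h2 : (pvMapDedup d).contains k = true := by rw [pvContains_mapDedup]; exact h
    have e1 : d.insert k v
        = PySem.Dict.mk (d.items.map fun p => if (p.1 == k) = true then (k, v) else p) := by
      simp only [PySem.Dict.insert, if_pos h]
    have e2 : (pvMapDedup d).insert k (PySem.List.dedup v)
        = PySem.Dict.mk ((pvMapDedup d).items.map
            fun p => if (p.1 == k) = true then (k, PySem.List.dedup v) else p) := by
      simp only [PySem.Dict.insert, if_pos h2]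
    rw [e1, e2]
    simp only [pvMapDedup, List.map_map]
    congr 1
    apply List.map_congr_left
    intro p _
    by_cases hp : p.1 = k <;> simp [hp]
  · have h2 : ¬ (pvMapDedup d).contains k = true := by rw [pvContains_mapDedup]; exact h
    have e1 : d.insert k v = PySem.Dict.mk (d.items ++ [(k, v)]) := by
      simp only [PySem.Dict.insert, if_neg h]
    have e2 : (pvMapDedup d).insert k (PySem.List.dedup v)
        = PySem.Dict.mk ((pvMapDedup d).items ++ [(k, PySem.List.dedup v)]) := by
      simp only [PySem.Dict.insert, if_neg h2]
    rw [e1, e2]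
    simp [pvMapDedup]

lemma pvInsert_self_aux (k : Int) (v : List Int) :
    ∀ l : List (Int × List Int), (l.map (·.1)).Nodup →
      (PySem.Dict.mk l).get? k = some v → (PySem.Dict.mk l).insert k v = PySem.Dict.mk l := by
  intro l
  induction l with
  | nil => intro _ h; simp [PySem.Dict.get?] at h
  | cons p rest ih =>
    intro hn h
    obtain ⟨a, b⟩ := p
    simp only [List.map_cons, List.nodup_cons] at hn
    rw [PySem.Dict.get?_mk_cons] at h
    by_cases ha : a = k
    · subst ha
      simp only [beq_self_eq_true, if_true, Option.some.injEq] at h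
      subst h
      have hc : (PySem.Dict.mk ((a, b) :: rest)).contains a = true := by
        simp [PySem.Dict.contains]
      simp only [PySem.Dict.insert, hc, if_true]
      congr 1
      simp only [List.map_cons, beq_self_eq_true, if_true]
      congr 1
      conv_rhs => rw [← List.map_id rest]
      apply List.map_congr_left
      intro q hq
      have hqa : (q.1 == a) = false := by
        simp only [beq_eq_false_iff_ne, ne_eq]
        exact fun e => hn.1 (e ▸ List.mem_map_of_mem hq)
      simp [hqa]
    · have hbeq : (a == k) = false := by simp [ha]
      rw [hbeq] at h
      simp only [Bool.false_eq_true, if_false] at h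
      by_cases hc : (PySem.Dict.mk rest).contains k = true
      · have ihr := ih hn.2 h
        have hc' : (PySem.Dict.mk ((a, b) :: rest)).contains k = true := by
          simp only [PySem.Dict.contains, List.any_cons] at hc ⊢
          simp [hc]
        simp only [PySem.Dict.insert, hc, hc', if_true] at ihr ⊢
        congr 1
        simp only [List.map_cons, hbeq, Bool.false_eq_true, if_false]
        congr 1
        exact congrArg PySem.Dict.items ihr
      · exfalso
        rw [PySem.Dict.contains_eq_isSome_get?, h] at hc
        simp at hc

lemma pvInsert_self (d : PySem.Dict Int (List Int)) (k : Int) (v : List Int)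
    (hn : d.keys.Nodup) (h : d.get? k = some v) : d.insert k v = d := by
  obtain ⟨l⟩ := d
  rw [PySem.Dict.keys_mk] at hn
  exact pvInsert_self_aux k v l hn h

lemma pvDedup_snoc (ys : List Int) (y : Int) :
    PySem.List.dedup (ys ++ [y]) =
      if y ∈ ys then PySem.List.dedup ys else PySem.List.dedup ys ++ [y] := by
  simp only [PySem.List.dedup_eq_ofList, PySem.Set.ofList_append, PySem.Set.update_cons,
    PySem.Set.update_nil]
  by_cases h : y ∈ ys <;>
    simp [PySem.Set.add, PySem.Set.contains, PySem.Set.mem_ofList, h]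

lemma pvStep_comm (d : PySem.Dict Int (List Int)) (q : Int × Int) (hn : d.keys.Nodup) :
    pvMapDedup (pvRawPoint d q) = pvRockStep (pvMapDedup d) q := by
  unfold pvRawPoint pvRockStep
  rw [pvInsert_mapDedup, pvGet?_mapDedup, PySem.Dict.getD_eq_get?_getD]
  cases hg : d.get? q.1 with
  | none => rfl
  | some ys =>
    simp only [Option.map_some, Option.getD_some]
    rw [pvDedup_snoc]
    by_cases hy : q.2 ∈ ys
    · rw [if_pos hy]
      have hmem : q.2 ∈ PySem.List.dedup ys := (PySem.List.mem_dedup ys q.2).mpr hy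
      simp only [hmem, if_true]
      exact pvInsert_self _ _ _ (by rw [pvKeys_mapDedup]; exact hn)
        (by rw [pvGet?_mapDedup, hg]; rfl)
    · rw [if_neg hy]
      have hmem : ¬ q.2 ∈ PySem.List.dedup ys := fun hm => hy ((PySem.List.mem_dedup ys q.2).mp hm)
      simp only [hmem, if_false]

lemma pvNodup_rawPoint (d : PySem.Dict Int (List Int)) (q : Int × Int)
    (hn : d.keys.Nodup) : (pvRawPoint d q).keys.Nodup := by
  unfold pvRawPoint
  exact PySem.Dict.nodup_keys_insert d q.1 _ hn

lemma pvFold_inv (s : List (Int × Int)) (d : PySem.Dict Int (List Int)) (hn : d.keys.Nodup) :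
    pvMapDedup (s.foldl pvRawPoint d) = s.foldl pvRockStep (pvMapDedup d) := by
  induction s generalizing d with
  | nil => rfl
  | cons q s ih =>
    simp only [List.foldl_cons]
    rw [ih _ (pvNodup_rawPoint d q hn), pvStep_comm d q hn]

lemma pvFoldl_flatMap {α β γ : Type} (l : List α) (f : α → List β) (g : γ → β → γ) (init : γ) :
    (l.flatMap f).foldl g init = l.foldl (fun a x => (f x).foldl g a) init := by
  induction l generalizing init with
  | nil => rfl
  | cons x l ih => simp only [List.flatMap_cons, List.foldl_append, List.foldl_cons, ih]

lemma pvFourIfs (x1 y1 x2 y2 : Int) (acc : List (List Int)) :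
    (let a1 := if x1 = x2 ∧ y1 < y2 then acc ++ (PySem.List.pyRange y1 (y2 + 1) 1).map (fun y => [x1, y]) else acc
     let a2 := if x1 = x2 ∧ y2 < y1 then a1 ++ (PySem.List.pyRange y2 (y1 + 1) 1).map (fun y => [x1, y]) else a1
     let a3 := if y1 = y2 ∧ x1 < x2 then a2 ++ (PySem.List.pyRange x1 (x2 + 1) 1).map (fun x => [x, y1]) else a2
     if y1 = y2 ∧ x2 < x1 then a3 ++ (PySem.List.pyRange x2 (x1 + 1) 1).map (fun x => [x, y1]) else a3)
    = acc ++ (pvSegRaw x1 y1 x2 y2).map (fun r => [r.1, r.2]) := by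
  simp only [pvSegRaw]
  split_ifs <;> first
    | omega
    | simp [List.map_map, Function.comp]

lemma pvBodyLast (path : List (List Int)) (k : Nat) (p1 : List Int) (acc : List (List Int))
    (hk : (k : Int) = (path.length : Int) - 1) :
    getRocksBody path acc ((k : Int), p1) = acc := by
  simp only [getRocksBody]
  rw [if_pos hk]

lemma pvBodyStep (path : List (List Int)) (k : Nat) (p1 p2 : List Int) (acc : List (List Int))
    (hk : ¬ ((k : Int) = (path.length : Int) - 1))
    (hp2 : PySem.List.pyGet? path ((k : Int) + 1) = some p2) :
    getRocksBody path acc ((k : Int), p1) = acc ++ (pvSeg p1 p2).map (fun r => [r.1, r.2]) := by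
  simp only [getRocksBody]
  rw [if_neg hk, hp2]
  simp only [Option.getD_some]
  exact pvFourIfs _ _ _ _ acc

lemma pvGetRocks_drop (path : List (List Int)) :
    ∀ (s : List (List Int)) (k : Nat) (acc : List (List Int)), path.drop k = s →
      (PySem.List.enumerate s (k : Int)).foldl (getRocksBody path) acc
        = acc ++ (s.zip s.tail).flatMap (fun q => (pvSeg q.1 q.2).map (fun r => [r.1, r.2])) := by
  intro s
  induction s with
  | nil => intro k acc _; simp [PySem.List.enumerate_nil]
  | cons p1 rest ih =>
    intro k acc h
    have hlen := congrArg List.length h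
    simp only [List.length_drop, List.length_cons] at hlen
    cases rest with
    | nil =>
      have h1 : path.length = k + 1 := by
        simp only [List.length_nil] at hlen; omega
      rw [PySem.List.enumerate_cons, PySem.List.enumerate_nil, List.foldl_cons, List.foldl_nil]
      rw [pvBodyLast path k p1 acc (by rw [h1]; push_cast; ring)]
      simp
    | cons p2 rest2 =>
      have h2 : k + 2 ≤ path.length := by
        simp only [List.length_cons] at hlen; omega
      have hk1 : path.drop (k + 1) = p2 :: rest2 := by rw [← List.tail_drop, h]; rfl
      have hp2 : PySem.List.pyGet? path ((k : Int) + 1) = some p2 := by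
        have h0 : (path.drop (k + 1))[0]? = some p2 := by rw [hk1]; rfl
        rw [List.getElem?_drop] at h0
        have hc : ((k : Int) + 1) = ((k + 1 : Nat) : Int) := by push_cast; ring
        rw [hc, PySem.List.pyGet?_natCast]
        simpa using h0
      rw [PySem.List.enumerate_cons, List.foldl_cons]
      have hcast : (k : Int) + 1 = ((k + 1 : Nat) : Int) := by push_cast; ring
      rw [hcast, ih (k + 1) _ hk1]
      rw [pvBodyStep path k p1 p2 acc (by omega) hp2]
      simp [List.append_assoc]

lemma pvGetRocks (path : List (List Int)) :
    getRocks path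
      = (path.zip path.tail).flatMap (fun q => (pvSeg q.1 q.2).map (fun r => [r.1, r.2])) := by
  unfold getRocks
  have h := pvGetRocks_drop path path 0 [] (by simp)
  simpa using h

lemma pvA_stream (rock_paths : List (List (List Int))) :
    make_rocks_by_x_map rock_paths
      = ((pvStream rock_paths).foldl pvRockStep PySem.Dict.empty).items := by
  unfold make_rocks_by_x_map pvStream
  rw [pvFoldl_flatMap]
  congr 1
  apply PySem.List.foldl_congr_mem
  intro d p _
  rw [pvGetRocks, ← List.map_flatMap, List.foldl_map]
  rfl

-- B's flat cell list of one segment is exactly the segment's cells in A's emission order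
lemma pvAux (x1 y1 x2 y2 : Int) :
    (if (x2 - x1 = 0) ↔ (y2 - y1 = 0) then ([] : List (Int × Int)) else
      (PySem.List.pyRange 0 (|x2 - x1| + |y2 - y1| + 1) 1).map
        (fun i => (min x1 x2 + i * (if x2 - x1 ≠ 0 then 1 else 0),
                   min y1 y2 + i * (if y2 - y1 ≠ 0 then 1 else 0))))
    = pvSegRaw x1 y1 x2 y2 := by
  by_cases hx : x2 - x1 = 0
  · by_cases hy : y2 - y1 = 0
    · rw [if_pos (by tauto)]
      unfold pvSegRaw
      split_ifs <;> first | omega | rfl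
    · have hx' : x2 = x1 := by omega
      subst hx'
      rw [if_neg (by tauto)]
      simp only [sub_self, abs_zero, min_self, ne_eq, not_true_eq_false, if_false, hy,
        not_false_eq_true, if_true, zero_add, mul_zero, add_zero, mul_one]
      by_cases h12 : y1 < y2
      · have habs : |y2 - y1| = y2 - y1 := abs_of_nonneg (by omega)
        rw [habs]
        unfold pvSegRaw
        rw [if_pos ⟨rfl, h12⟩]
        rw [PySem.List.pyRange_one, PySem.List.pyRange_one, List.map_map, List.map_map]
        have hlen : (y2 - y1 + 1 - 0).toNat = (y2 + 1 - y1).toNat := by omega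
        rw [hlen]
        apply List.map_congr_left
        intro k _
        have hmin : min y1 y2 = y1 := min_eq_left (by omega)
        simp [Function.comp, hmin]
      · have h21 : y2 < y1 := by omega
        have habs : |y2 - y1| = y1 - y2 := by rw [abs_sub_comm]; exact abs_of_nonneg (by omega)
        rw [habs]
        unfold pvSegRaw
        rw [if_neg (by omega), if_pos ⟨rfl, h21⟩]
        rw [PySem.List.pyRange_one, PySem.List.pyRange_one, List.map_map, List.map_map]
        have hlen : (y1 - y2 + 1 - 0).toNat = (y1 + 1 - y2).toNat := by omega
        rw [hlen]
        apply List.map_congr_left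
        intro k _
        have hmin : min y1 y2 = y2 := min_eq_right (by omega)
        simp [Function.comp, hmin]
  · by_cases hy : y2 - y1 = 0
    · have hy' : y2 = y1 := by omega
      subst hy'
      rw [if_neg (by tauto)]
      simp only [sub_self, abs_zero, min_self, ne_eq, hx, not_false_eq_true, if_true,
        not_true_eq_false, if_false, add_zero, mul_zero, mul_one]
      by_cases h12 : x1 < x2
      · have habs : |x2 - x1| = x2 - x1 := abs_of_nonneg (by omega)
        rw [habs]
        unfold pvSegRaw
        rw [if_neg (by omega), if_neg (by omega), if_pos ⟨rfl, h12⟩]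
        rw [PySem.List.pyRange_one, PySem.List.pyRange_one, List.map_map, List.map_map]
        have hlen : (x2 - x1 + 1 - 0).toNat = (x2 + 1 - x1).toNat := by omega
        rw [hlen]
        apply List.map_congr_left
        intro k _
        have hmin : min x1 x2 = x1 := min_eq_left (by omega)
        simp [Function.comp, hmin]
      · have h21 : x2 < x1 := by omega
        have habs : |x2 - x1| = x1 - x2 := by rw [abs_sub_comm]; exact abs_of_nonneg (by omega)
        rw [habs]
        unfold pvSegRaw
        rw [if_neg (by omega), if_neg (by omega), if_neg (by omega), if_pos ⟨rfl, h21⟩]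
        rw [PySem.List.pyRange_one, PySem.List.pyRange_one, List.map_map, List.map_map]
        have hlen : (x1 - x2 + 1 - 0).toNat = (x1 + 1 - x2).toNat := by omega
        rw [hlen]
        apply List.map_congr_left
        intro k _
        have hmin : min x1 x2 = x2 := min_eq_right (by omega)
        simp [Function.comp, hmin]
    · -- diagonal
      rw [if_pos (iff_of_false hx hy)]
      unfold pvSegRaw
      split_ifs <;> first | omega | rfl

lemma pvBCell_eq_pvSeg (p1 p2 : List Int) : bCell p1 p2 = pvSeg p1 p2 := by
  unfold bCell pvSeg
  exact pvAux _ _ _ _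

-- B's first pass builds the same stream of cells
lemma pvB_cells (rock_paths : List (List (List Int))) :
    rock_paths.foldl
        (fun acc path => (path.zip path.tail).foldl (fun acc q => acc ++ bCell q.1 q.2) acc) []
      = pvStream rock_paths := by
  have h1 : ∀ (path : List (List Int)) (acc : List (Int × Int)),
      (path.zip path.tail).foldl (fun acc q => acc ++ bCell q.1 q.2) acc
        = acc ++ (path.zip path.tail).flatMap (fun q => pvSeg q.1 q.2) := by
    intro path acc
    rw [PySem.List.foldl_append_eq_flatMap (fun q : List Int × List Int => bCell q.1 q.2)]
    congr 1
    congr 1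
    funext q
    exact pvBCell_eq_pvSeg q.1 q.2
  simp only [h1]
  rw [PySem.List.foldl_append_eq_flatMap]
  simp [pvStream]

-- first-occurrence dedup: helper characterisations
lemma pvFoldlAdd (l : List Int) : ∀ s : List Int,
    l.foldl PySem.Set.add s = s ++ (PySem.Set.ofList l).filter (fun a => decide (a ∉ s)) := by
  induction l with
  | nil => intro s; simp [PySem.Set.ofList]
  | cons a l ih =>
    intro s
    have h2 : PySem.Set.ofList (a :: l) = l.foldl PySem.Set.add [a] := by
      rw [PySem.Set.ofList_eq_foldl]; rfl
    rw [List.foldl_cons, ih (PySem.Set.add s a), h2, ih [a]]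
    by_cases ha : a ∈ s
    · have h1 : PySem.Set.add s a = s := by
        unfold PySem.Set.add PySem.Set.contains; simp [ha]
      rw [h1]
      simp only [List.filter_append, List.filter_filter]
      have hone : List.filter (fun x => decide (x ∉ s)) [a] = [] := by simp [ha]
      rw [hone]
      simp only [List.nil_append]
      congr 1
      apply List.filter_congr
      intro x _
      by_cases hx : x = a
      · subst hx; simp [ha]
      · simp [hx]
    · have h1 : PySem.Set.add s a = s ++ [a] := by
        unfold PySem.Set.add PySem.Set.contains; simp [ha]
      rw [h1]
      simp only [List.filter_append, List.filter_filter, List.append_assoc]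
      have hone : List.filter (fun x => decide (x ∉ s)) [a] = [a] := by simp [ha]
      rw [hone]
      congr 2
      apply List.filter_congr
      intro x _
      by_cases hx : x = a
      · subst hx; simp
      · simp [hx, List.mem_append]

lemma pvDedup_cons (x : Int) (l : List Int) :
    PySem.List.dedup (x :: l) = x :: (PySem.List.dedup l).filter (fun a => a ≠ x) := by
  simp only [PySem.List.dedup_eq_ofList]
  have h2 : PySem.Set.ofList (x :: l) = l.foldl PySem.Set.add [x] := by
    rw [PySem.Set.ofList_eq_foldl]; rfl
  rw [h2, pvFoldlAdd]
  simp only [List.cons_append, List.nil_append, List.cons.injEq, true_and]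
  apply List.filter_congr
  intro a _
  simp

lemma pvYs_nil (x : Int) : pvYs [] x = [] := rfl

lemma pvYs_cons (c : Int × Int) (s : List (Int × Int)) (k : Int) :
    pvYs (c :: s) k = if c.1 = k then c.2 :: pvYs s k else pvYs s k := by
  simp only [pvYs, List.filter_cons]
  by_cases h : c.1 = k <;> simp [h]

lemma pvGroup (s : List (Int × Int)) : ∀ (d : PySem.Dict Int (List Int)), d.keys.Nodup →
    (s.foldl pvRawPoint d).items
      = d.items.map (fun kv => (kv.1, kv.2 ++ pvYs s kv.1))
        ++ ((PySem.List.dedup (s.map Prod.fst)).filter (fun x => !(d.contains x))).map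
             (fun x => (x, pvYs s x)) := by
  induction s with
  | nil =>
    intro d hn
    simp [pvYs_nil]
  | cons c s ih =>
    intro d hn
    obtain ⟨x, y⟩ := c
    rw [List.foldl_cons]
    have hstep : pvRawPoint d (x, y) = d.insert x (d.getD x [] ++ [y]) := rfl
    rw [hstep, ih _ (PySem.Dict.nodup_keys_insert d x _ hn)]
    simp only [List.map_cons, pvDedup_cons]
    by_cases hc : d.contains x = true
    · -- key already present: insert overwrites in place
      rw [PySem.Dict.items_insert_of_contains _ _ hc, List.map_map]
      -- first summand
      have h1 : d.items.map ((fun kv => (kv.1, kv.2 ++ pvYs s kv.1)) ∘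
            (fun p => if p.1 == x then (x, d.getD x [] ++ [y]) else p))
          = d.items.map (fun kv => (kv.1, kv.2 ++ pvYs ((x, y) :: s) kv.1)) := by
        apply List.map_congr_left
        intro p hp
        obtain ⟨k0, v0⟩ := p
        by_cases hpx : k0 = x
        · have hg : d.getD x [] = v0 := by
            rw [← hpx]
            exact PySem.Dict.getD_of_mem_items d hp hn []
          simp only [Function.comp_apply, hpx, beq_self_eq_true, if_true, hg, pvYs_cons]
          simp [List.append_assoc]
        · have hb : (k0 == x) = false := by simp [hpx]
          have hxk : ¬ x = k0 := fun e => hpx e.symm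
          simp only [Function.comp_apply, hb, Bool.false_eq_true, if_false, pvYs_cons]
          simp [hxk]
      rw [h1]
      congr 1
      -- second summand
      have hfx : (!d.contains x) = false := by simp [hc]
      rw [List.filter_cons]
      simp only [hfx, Bool.false_eq_true, if_false, List.filter_filter]
      have h2 : (PySem.List.dedup (s.map Prod.fst)).filter
            (fun k => !( (d.insert x (d.getD x [] ++ [y])).contains k))
          = (PySem.List.dedup (s.map Prod.fst)).filter (fun a => !d.contains a && decide (a ≠ x)) := by
        apply List.filter_congr
        intro k _
        rw [PySem.Dict.contains_insert]
        by_cases hk : k = x <;> simp [hk, hc]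
      rw [h2]
      apply List.map_congr_left
      intro z hz
      have hzx : z ≠ x := by
        have := List.of_mem_filter hz
        simp at this
        exact this.2
      have hxz : ¬ x = z := fun e => hzx e.symm
      simp [pvYs_cons, hxz]
    · -- fresh key: appended at the end
      have hc' : d.contains x = false := by simpa using hc
      rw [PySem.Dict.items_insert_of_not_contains _ _ hc',
        PySem.Dict.getD_of_not_contains _ _ hc']
      simp only [List.map_append, List.map_cons, List.map_nil, List.nil_append]
      have hfx : (!d.contains x) = true := by simp [hc']
      rw [List.filter_cons]
      simp only [hfx, if_true, List.map_cons, List.filter_filter]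
      have h1 : d.items.map (fun kv => (kv.1, kv.2 ++ pvYs s kv.1))
          = d.items.map (fun kv => (kv.1, kv.2 ++ pvYs ((x, y) :: s) kv.1)) := by
        apply List.map_congr_left
        intro p hp
        have hpx : p.1 ≠ x := by
          intro e
          have hm : p.1 ∈ d.keys := PySem.Dict.mem_keys_of_mem_items d hp
          rw [e] at hm
          rw [← PySem.Dict.contains_iff_mem_keys] at hm
          rw [hc'] at hm
          simp at hm
        have hxp : ¬ x = p.1 := fun e => hpx e.symm
        simp [pvYs_cons, hxp]
      rw [h1]
      have h2 : (PySem.List.dedup (s.map Prod.fst)).filter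
            (fun k => !( (d.insert x [y]).contains k))
          = (PySem.List.dedup (s.map Prod.fst)).filter (fun a => !d.contains a && decide (a ≠ x)) := by
        apply List.filter_congr
        intro k _
        rw [PySem.Dict.contains_insert]
        by_cases hk : k = x <;> simp [hk, hc']
      rw [h2]
      have h3 : ((PySem.List.dedup (s.map Prod.fst)).filter
            (fun a => !d.contains a && decide (a ≠ x))).map (fun z => (z, pvYs s z))
          = ((PySem.List.dedup (s.map Prod.fst)).filter
            (fun a => !d.contains a && decide (a ≠ x))).map (fun z => (z, pvYs ((x, y) :: s) z)) := by
        apply List.map_congr_left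
        intro z hz
        have hzx : z ≠ x := by
          have := List.of_mem_filter hz
          simp at this
          exact this.2
        have hxz : ¬ x = z := fun e => hzx e.symm
        simp [pvYs_cons, hxz]
      rw [h3]
      simp [pvYs_cons, List.append_assoc]

lemma pvItems_mapDedup (d : PySem.Dict Int (List Int)) :
    (pvMapDedup d).items = d.items.map (fun p => (p.1, PySem.List.dedup p.2)) := rfl

lemma pvB_group (rock_paths : List (List (List Int))) :
    make_rocks_by_x_map_alt rock_paths
      = (pvMapDedup ((pvStream rock_paths).foldl pvRawPoint PySem.Dict.empty)).items := by
  unfold make_rocks_by_x_map_alt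
  rw [pvB_cells]
  rw [pvItems_mapDedup, pvGroup (pvStream rock_paths) _ PySem.Dict.nodup_keys_empty]
  simp [pvYs, PySem.Dict.empty, List.map_map, Function.comp_def]

-- ===== VERDICT (by name: the statement is the Claim_ definition above) =====
theorem make_rocks_by_x_map_spec : Claim_equal_make_rocks_by_x_map := by
  intro rock_paths _ _
  unfold Spec_make_rocks_by_x_map
  rw [pvA_stream, pvB_group, pvFold_inv _ _ PySem.Dict.nodup_keys_empty]
  rfl
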